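-- pv_equiv track=rewrite | github.com/gt-hwswcosec/cmprs2025 | ProductRegisters/Tools/MersenneTools.py | cycle_lengths
-- ===== SOURCE A (Python) =====
-- from itertools import chain, combinations
--
-- def assert_no_repeats(sizes):
--     already_seen = set()
--     for s in sizes:
--         if s in already_seen:
--             raise ValueError("Configuration-based properties cannot be determined with repeated sizes")
--         already_seen.add(s)
--
-- def powerset(iterable):
--     s = list(iterable)
--     return chain.from_iterable(combinations(s, r) for r in range(len(s)+1))
--
-- def cycle_lengths(sizes):
--     assert_no_repeats(sizes)
--     primes = [2**a-1 for a in sizes]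
--     out = []
--     for combo in powerset(primes):
--         prod = 1
--         for c in combo:
--             prod *= c
--         out.append(prod)
--     return out
-- ===== SOURCE B (Python) =====
-- def cycle_lengths(sizes):
--     # dynamic programming over suffixes: rows[r] holds the products of all
--     # r-subsets of the suffix processed so far, in combinations order; each
--     # subset product costs exactly one multiplication.
--     rows = [[1]]
--     for a in reversed(sizes):
--         p = 2 ** a - 1
--         new = [[1]]
--         for r in range(1, len(rows) + 1):
--             new.append([p * q for q in rows[r - 1]] +
--                        (rows[r] if r < len(rows) else []))
--         rows = new
--     out = []
--     for row in rows:
--         out += row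
--     return out
-- ===== Notes on version B (the rewrite author's own statement) =====
-- stated objective: faster
-- what changed: B replaces per-subset tuple materialization and re-multiplication by a Pascal-style dynamic program over suffixes: a table of rows (row r = products of the r-subsets seen so far, in combinations order) is extended one element at a time, so each subset product costs exactly one multiplication.
-- outside the precondition, e.g. on cycle_lengths([-1]): A returns [1, -0.5], B returns [1, -0.5]; on cycle_lengths([2, 2]): A raises ValueError, B returns [1, 3, 3, 9]
import Mathlib
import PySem

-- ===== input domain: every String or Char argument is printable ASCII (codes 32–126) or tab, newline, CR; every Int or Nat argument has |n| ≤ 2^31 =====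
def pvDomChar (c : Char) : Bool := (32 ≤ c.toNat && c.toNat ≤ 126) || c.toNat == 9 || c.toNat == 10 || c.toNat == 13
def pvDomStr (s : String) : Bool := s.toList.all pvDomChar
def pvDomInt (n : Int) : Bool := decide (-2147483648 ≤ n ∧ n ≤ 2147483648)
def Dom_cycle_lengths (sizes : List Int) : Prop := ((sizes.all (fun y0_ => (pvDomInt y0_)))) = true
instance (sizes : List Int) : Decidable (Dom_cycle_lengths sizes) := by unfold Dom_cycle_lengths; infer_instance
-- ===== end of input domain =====

-- B replaces per-subset re-multiplication by a Pascal-style row DP that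
-- computes each subset product with one multiplication (objective: faster).


-- ===== PORT A =====
-- itertools.combinations(s, r): all r-combinations in lexicographic index order
def pvComb : List Int → Nat → List (List Int)
  | _, 0 => [[]]
  | [], _ + 1 => []
  | x :: xs, r + 1 => ((pvComb xs r).map (fun c => x :: c)) ++ pvComb xs (r + 1)

-- A: primes = [2**a-1 for a in sizes]; for combo in powerset(primes): prod=1; prod*=c; out.append(prod)
-- (assert_no_repeats never fires inside Pre_; 'a.toNat' is exact since Pre_ requires 0 ≤ a)
def cycle_lengths (sizes : List Int) : List Int :=
  let primes := sizes.map (fun a => (2 : Int) ^ a.toNat - 1)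
  let pow := (List.range (primes.length + 1)).flatMap (fun r => pvComb primes r)
  pow.foldl (fun out combo => out ++ [combo.foldl (fun p c => p * c) 1]) []

-- ===== PORT B =====
-- B's inner loop: from the table [rows[0], …, rows[k]] build
-- [rows[0]·p ++ rows[1], …, rows[k-1]·p ++ rows[k], rows[k]·p]
def pvMerge (p : Int) : List (List Int) → List (List Int)
  | [] => []
  | [row] => [row.map (fun q => p * q)]
  | row :: next :: rest => (row.map (fun q => p * q) ++ next) :: pvMerge p (next :: rest)

-- B: fold over reversed(sizes) extending the table, then concatenate the rows
def cycle_lengths_alt (sizes : List Int) : List Int :=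
  (sizes.foldr (fun a rows => [1] :: pvMerge ((2 : Int) ^ a.toNat - 1) rows) [[1]]).flatten

-- ===== PRECONDITION & SPEC =====
-- Pre_ excludes repeated elements (A raises ValueError there) and negative
-- elements (2**a is then fractional: both programs return floats, not ints).
def Pre_cycle_lengths (sizes : List Int) : Prop :=
  sizes.Nodup ∧ ∀ a ∈ sizes, 0 ≤ a
instance (sizes : List Int) : Decidable (Pre_cycle_lengths sizes) := by
  unfold Pre_cycle_lengths; infer_instance
def pvWitness_cycle_lengths : List Int := [2, 3, 5]

def Spec_cycle_lengths (sizes : List Int) (out : List Int) : Prop := out = cycle_lengths_alt sizes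
instance (sizes : List Int) (out : List Int) : Decidable (Spec_cycle_lengths sizes out) := by unfold Spec_cycle_lengths; infer_instance

-- ===== CLAIM (what is proved, stated in full; the proofs are below) =====
def Claim_equal_cycle_lengths : Prop := ∀ (sizes : List Int), Dom_cycle_lengths sizes → Pre_cycle_lengths sizes → Spec_cycle_lengths sizes (cycle_lengths sizes)

-- ===== LEMMAS AND PROOFS =====
theorem foldl_mul_shift : ∀ (c : List Int) (a : Int),
    c.foldl (fun p c => p * c) a = a * c.foldl (fun p c => p * c) 1 := by
  intro c
  induction c with
  | nil => simp
  | cons x c ih =>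
    intro a
    simp only [List.foldl_cons]
    rw [ih (a * x), ih (1 * x)]
    ring

theorem pvComb_nil : ∀ (xs : List Int) (r : Nat), xs.length < r → pvComb xs r = [] := by
  intro xs
  induction xs with
  | nil => intro r h; cases r with
    | zero => omega
    | succ r => simp [pvComb]
  | cons x xs ih =>
    intro r h
    cases r with
    | zero => simp at h
    | succ r =>
      simp at h
      simp [pvComb, ih r (by omega), ih (r + 1) (by omega)]

theorem pvMerge_map_range (p : Int) : ∀ (n : Nat) (g : Nat → List Int),
    pvMerge p ((List.range (n + 1)).map g) =
      (List.range n).map (fun r => (g r).map (fun q => p * q) ++ g (r + 1))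
        ++ [(g n).map (fun q => p * q)] := by
  intro n
  induction n with
  | zero => intro g; simp [pvMerge]
  | succ n ih =>
    intro g
    have h2 : (List.range (n + 1)).map (fun k => g (k + 1))
        = g 1 :: (List.range n).map (fun k => g (k + 2)) := by
      rw [List.range_succ_eq_map (n := n)]
      simp [List.map_map, Function.comp_def]
    have key := ih (fun k => g (k + 1))
    rw [h2] at key
    rw [List.range_succ_eq_map (n := n + 1), List.map_cons, List.map_map]
    have h3 : List.map (g ∘ Nat.succ) (List.range (n + 1))
        = (List.range (n + 1)).map (fun k => g (k + 1)) := by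
      simp [Function.comp_def]
    rw [h3, h2]
    simp only [pvMerge]
    rw [key, List.range_succ_eq_map (n := n), List.map_cons, List.map_map]
    simp [Function.comp_def]

theorem table_step (p : Int) (xs : List Int) :
    (List.range (xs.length + 2)).map
        (fun r => (pvComb (p :: xs) r).map (fun c => c.foldl (fun p c => p * c) 1)) =
      [1] ::
        ((List.range xs.length).map
            (fun r => ((pvComb xs r).map (fun c => c.foldl (fun p c => p * c) 1)).map (fun q => p * q)
              ++ (pvComb xs (r + 1)).map (fun c => c.foldl (fun p c => p * c) 1))
          ++ [((pvComb xs xs.length).map (fun c => c.foldl (fun p c => p * c) 1)).map (fun q => p * q)]) := by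
  have hprod : ∀ c : List Int, (p :: c).foldl (fun p c => p * c) 1
      = p * c.foldl (fun p c => p * c) 1 := by
    intro c
    simp only [List.foldl_cons]
    rw [foldl_mul_shift c (1 * p)]
    ring
  rw [List.range_succ_eq_map (n := xs.length + 1), List.map_cons, List.map_map]
  have h4 : ∀ r, (pvComb (p :: xs) (r + 1)).map (fun c => c.foldl (fun p c => p * c) 1)
      = ((pvComb xs r).map (fun c => c.foldl (fun p c => p * c) 1)).map (fun q => p * q)
        ++ (pvComb xs (r + 1)).map (fun c => c.foldl (fun p c => p * c) 1) := by
    intro r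
    simp only [pvComb, List.map_append, List.map_map]
    congr 1
    apply List.map_congr_left
    intro c _
    simp [hprod c]
  congr 1
  rw [List.range_succ (n := xs.length), List.map_append, List.map_cons, List.map_nil]
  congr 1
  · apply List.map_congr_left
    intro r _
    simp [Function.comp_def, Nat.succ_eq_add_one, h4 r, List.map_map]
  · simp [Function.comp_def, Nat.succ_eq_add_one, h4 xs.length,
      pvComb_nil xs (xs.length + 1) (by omega), List.map_map]

theorem tbl_eq : ∀ (xs : List Int),
    xs.foldr (fun a rows => [1] :: pvMerge ((2 : Int) ^ a.toNat - 1) rows) [[1]] =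
      (List.range ((xs.map (fun a => (2 : Int) ^ a.toNat - 1)).length + 1)).map
        (fun r => (pvComb (xs.map (fun a => (2 : Int) ^ a.toNat - 1)) r).map
          (fun c => c.foldl (fun p c => p * c) 1)) := by
  intro xs
  induction xs with
  | nil => simp [pvComb]
  | cons a xs ih =>
    rw [List.foldr_cons, ih, pvMerge_map_range, List.map_cons]
    rw [show ((((2:Int) ^ a.toNat - 1) :: xs.map (fun a => (2 : Int) ^ a.toNat - 1)).length + 1)
        = (xs.map (fun a => (2 : Int) ^ a.toNat - 1)).length + 2 by simp]
    rw [table_step ((2 : Int) ^ a.toNat - 1) (xs.map (fun a => (2 : Int) ^ a.toNat - 1))]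

theorem foldl_append_eq_map (f : List Int → Int) :
    ∀ (l : List (List Int)) (init : List Int),
      l.foldl (fun out combo => out ++ [f combo]) init = init ++ l.map f := by
  intro l
  induction l with
  | nil => simp
  | cons c l ih => intro init; simp [List.foldl, ih]

-- ===== VERDICT (by name: the statement is the Claim_ definition above) =====
theorem cycle_lengths_spec : Claim_equal_cycle_lengths := by
  intro sizes _ _
  unfold Spec_cycle_lengths cycle_lengths cycle_lengths_alt
  rw [tbl_eq]
  rw [foldl_append_eq_map (fun combo => combo.foldl (fun p c => p * c) 1)]
  simp only [List.nil_append, List.flatMap_def, List.map_flatten, List.map_map, Function.comp_def]
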